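-- pv_equiv track=rewrite | github.com/esthel7/Baekjoon | 백준/Silver/9095. 1， 2， 3 더하기/1， 2， 3 더하기.py | find
-- ===== SOURCE A (Python) =====
-- def find(n):
--   l=[0 for i in range(n+1)]
--   l[0]=1
--   for i in range(n+1):
--     if i+1<=n:
--       l[i+1]+=l[i]
--     if i+2<=n:
--       l[i+2]+=l[i]
--     if i+3<=n:
--       l[i+3]+=l[i]
--   return l[n]
-- ===== SOURCE B (Python) =====
-- def find(n):
--     # 3x3 matrices as flat 9-tuples, row-major: fast exponentiation of the
--     # order-3 recurrence matrix; O(log n) instead of A's O(n) table.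
--     def mul(x, y):
--         (a, b, c, d, e, f, g, h, i) = x
--         (A, B, C, D, E, F, G, H, I) = y
--         return (a*A + b*D + c*G, a*B + b*E + c*H, a*C + b*F + c*I,
--                 d*A + e*D + f*G, d*B + e*E + f*H, d*C + e*F + f*I,
--                 g*A + h*D + i*G, g*B + h*E + i*H, g*C + h*F + i*I)
--     def mpow(m, k):
--         if k == 0:
--             return (1, 0, 0, 0, 1, 0, 0, 0, 1)
--         r = mpow(m, k // 2)
--         r = mul(r, r)
--         if k % 2:
--             r = mul(r, m)
--         return r
--     p = mpow((1, 1, 1, 1, 0, 0, 0, 1, 0), n)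
--     return 2 * p[6] + p[7] + p[8]
-- ===== Notes on version B (the rewrite author's own statement) =====
-- stated objective: faster
-- what changed: Replaces the O(n) prefix-contribution DP table with binary exponentiation of the 3x3 companion matrix of the order-3 recurrence, O(log n) arithmetic steps.
-- outside the precondition, e.g. on find(-1): A raises IndexError, B raises RecursionError
import Mathlib
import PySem

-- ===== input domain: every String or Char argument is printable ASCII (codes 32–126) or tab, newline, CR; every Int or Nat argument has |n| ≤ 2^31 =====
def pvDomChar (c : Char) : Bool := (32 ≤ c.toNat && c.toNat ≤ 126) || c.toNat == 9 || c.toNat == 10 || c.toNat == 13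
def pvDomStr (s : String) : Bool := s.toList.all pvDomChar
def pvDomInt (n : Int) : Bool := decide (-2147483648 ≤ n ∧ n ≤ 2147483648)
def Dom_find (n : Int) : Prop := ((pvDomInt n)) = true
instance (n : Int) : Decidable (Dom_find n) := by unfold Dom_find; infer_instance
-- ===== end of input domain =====

-- B replaces A's O(n) DP table by binary exponentiation of the 3x3 companion
-- matrix of the order-3 recurrence (O(log n) arithmetic steps); return values
-- proved equal for all n ≥ 0 (A raises IndexError for n < 0).

-- ===== PORT A =====
-- one iteration of A's `for i in range(n+1)` body (the three guarded `l[i+k] += l[i]`)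
def stepA (n : Int) (l : List Int) (i : Int) : List Int :=
  let l := if i+1 ≤ n then PySem.List.pySetD l (i+1) (PySem.List.pyGetD l (i+1) 0 + PySem.List.pyGetD l i 0) else l
  let l := if i+2 ≤ n then PySem.List.pySetD l (i+2) (PySem.List.pyGetD l (i+2) 0 + PySem.List.pyGetD l i 0) else l
  let l := if i+3 ≤ n then PySem.List.pySetD l (i+3) (PySem.List.pyGetD l (i+3) 0 + PySem.List.pyGetD l i 0) else l
  l

def find (n : Int) : Int :=
  let l : List Int := (PySem.List.pyRange 0 (n+1) 1).map (fun _ => 0)  -- [0 for i in range(n+1)]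
  let l := PySem.List.pySetD l 0 1                                     -- l[0]=1 (in range under Pre_: n ≥ 0)
  let l := (PySem.List.pyRange 0 (n+1) 1).foldl (stepA n) l            -- for i in range(n+1): …
  PySem.List.pyGetD l n 0                                              -- return l[n] (in range under Pre_)

-- ===== PORT B =====
-- 3x3 integer matrix, row-major flat 9-tuple as in Source B
structure M3 where
  a : Int
  b : Int
  c : Int
  d : Int
  e : Int
  f : Int
  g : Int
  h : Int
  i : Int
deriving DecidableEq, Repr

def mulM (x y : M3) : M3 :=
  ⟨x.a*y.a + x.b*y.d + x.c*y.g, x.a*y.b + x.b*y.e + x.c*y.h, x.a*y.c + x.b*y.f + x.c*y.i,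
   x.d*y.a + x.e*y.d + x.f*y.g, x.d*y.b + x.e*y.e + x.f*y.h, x.d*y.c + x.e*y.f + x.f*y.i,
   x.g*y.a + x.h*y.d + x.i*y.g, x.g*y.b + x.h*y.e + x.i*y.h, x.g*y.c + x.h*y.f + x.i*y.i⟩

def idM : M3 := ⟨1,0,0, 0,1,0, 0,0,1⟩
def matM : M3 := ⟨1,1,1, 1,0,0, 0,1,0⟩

-- Source B's mpow recurses on k//2; it terminates exactly for k ≥ 0, so it is Nat
-- recursion (Nat `/`, `%` agree with Python's on nonnegative ints).
def mpow (m : M3) (k : Nat) : M3 :=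
  if hk : k = 0 then idM
  else
    let r := mpow m (k / 2)
    let r2 := mulM r r
    if k % 2 ≠ 0 then mulM r2 m else r2
termination_by k
decreasing_by exact Nat.div_lt_self (Nat.pos_of_ne_zero hk) (by omega)

def find_alt (n : Int) : Int :=
  let p := mpow matM n.toNat   -- exact for n ≥ 0 (Pre_); Python diverges for n < 0
  2 * p.g + p.h + p.i

-- ===== PRECONDITION & SPEC =====
-- A raises IndexError for n < 0 (l is empty, l[0]=1 fails); excluded.
def Pre_find (n : Int) : Prop := 0 ≤ n
instance (n : Int) : Decidable (Pre_find n) := by unfold Pre_find; infer_instance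
def pvWitness_find : Int := 4
def Spec_find (n : Int) (out : Int) : Prop := out = find_alt n
instance (n : Int) (out : Int) : Decidable (Spec_find n out) := by unfold Spec_find; infer_instance

-- ===== CLAIM (what is proved, stated in full; the proofs are below) =====
def Claim_equal_find : Prop := ∀ (n : Int), Dom_find n → Pre_find n → Spec_find n (find n)

-- ===== LEMMAS AND PROOFS =====

-- the tribonacci reference sequence: number of ordered 1/2/3-sums of n
def trib : Nat → Int
  | 0 => 1
  | 1 => 1
  | 2 => 2
  | n+3 => trib n + trib (n+1) + trib (n+2)

-- ----- B side -----
def powM (m : M3) : Nat → M3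
  | 0 => idM
  | k+1 => mulM (powM m k) m

theorem mulM_assoc (x y z : M3) : mulM (mulM x y) z = mulM x (mulM y z) := by
  simp only [mulM, M3.mk.injEq]
  refine ⟨?_, ?_, ?_, ?_, ?_, ?_, ?_, ?_, ?_⟩ <;> ring

theorem mulM_id (x : M3) : mulM x idM = x := by
  simp only [mulM, idM]
  cases x
  simp only [M3.mk.injEq]
  refine ⟨?_, ?_, ?_, ?_, ?_, ?_, ?_, ?_, ?_⟩ <;> ring

theorem id_mulM (x : M3) : mulM idM x = x := by
  simp only [mulM, idM]
  cases x
  simp only [M3.mk.injEq]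
  refine ⟨?_, ?_, ?_, ?_, ?_, ?_, ?_, ?_, ?_⟩ <;> ring

theorem powM_succ' (m : M3) (k : Nat) : powM m (k+1) = mulM m (powM m k) := by
  induction k with
  | zero => simp [powM, mulM_id, id_mulM]
  | succ k ih =>
    calc powM m (k+2) = mulM (powM m (k+1)) m := rfl
    _ = mulM (mulM m (powM m k)) m := by rw [ih]
    _ = mulM m (mulM (powM m k) m) := mulM_assoc ..
    _ = mulM m (powM m (k+1)) := rfl

theorem powM_add (m : M3) (a b : Nat) : powM m (a+b) = mulM (powM m a) (powM m b) := by
  induction b with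
  | zero => simp [powM, mulM_id]
  | succ b ih =>
    calc powM m (a+(b+1)) = powM m ((a+b)+1) := by ring_nf
    _ = mulM (powM m (a+b)) m := rfl
    _ = mulM (mulM (powM m a) (powM m b)) m := by rw [ih]
    _ = mulM (powM m a) (mulM (powM m b) m) := mulM_assoc ..
    _ = mulM (powM m a) (powM m (b+1)) := rfl

theorem mpow_eq_powM (m : M3) (k : Nat) : mpow m k = powM m k := by
  induction k using Nat.strong_induction_on with
  | _ k ih =>
    rw [mpow]
    by_cases h0 : k = 0
    · simp [h0, powM]
    · simp only [h0, dite_false]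
      have ih2 := ih (k / 2) (Nat.div_lt_self (Nat.pos_of_ne_zero h0) (by omega))
      rw [ih2]
      by_cases h2 : k % 2 = 0
      · simp only [h2, ne_eq, not_true_eq_false, if_false]
        rw [← powM_add, show k/2 + k/2 = k by omega]
      · simp only [h2, ne_eq, not_false_eq_true, if_true]
        rw [← powM_add]
        have hk : k = (k/2 + k/2) + 1 := by omega
        conv_rhs => rw [hk]
        rfl

theorem powM_trib (k : Nat) :
    2 * (powM matM k).a + (powM matM k).b + (powM matM k).c = trib (k+2) ∧
    2 * (powM matM k).d + (powM matM k).e + (powM matM k).f = trib (k+1) ∧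
    2 * (powM matM k).g + (powM matM k).h + (powM matM k).i = trib k := by
  induction k with
  | zero => refine ⟨?_, ?_, ?_⟩ <;> simp [powM, idM, trib]
  | succ k ih =>
    obtain ⟨h1, h2, h3⟩ := ih
    rw [powM_succ']
    have htr : trib (k+3) = trib k + trib (k+1) + trib (k+2) := rfl
    set P := powM matM k with hP
    refine ⟨?_, ?_, ?_⟩
    · simp only [mulM, matM]
      rw [show k+1+2 = k+3 from rfl, htr]
      linarith
    · simp only [mulM, matM]
      rw [show k+1+1 = k+2 from rfl]
      linarith
    · simp only [mulM, matM]
      linarith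

theorem find_alt_eq_trib (n : Int) : find_alt n = trib n.toNat := by
  show 2 * (mpow matM n.toNat).g + (mpow matM n.toNat).h + (mpow matM n.toNat).i = trib n.toNat
  rw [mpow_eq_powM]
  exact (powM_trib n.toNat).2.2

-- ----- A side -----
-- the DP table after the iterations i = 0 .. i-1 have been processed
def stVal (i j : Nat) : Int :=
  if j ≤ i then trib j
  else if j = i+1 then (if 1 ≤ i then trib (i-1) else 0) + (if 2 ≤ i then trib (i-2) else 0)
  else if j = i+2 then (if 1 ≤ i then trib (i-1) else 0)
  else 0

def stList (N i : Nat) : List Int := (List.range (N+1)).map (stVal i)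

theorem length_stList (N i : Nat) : (stList N i).length = N + 1 := by
  simp [stList]

theorem getD_stList (N i j : Nat) (h : j ≤ N) : (stList N i).getD j 0 = stVal i j := by
  rw [List.getD_eq_getElem _ _ (by simp [length_stList]; omega)]
  simp [stList]

theorem getD_set_ne (l : List Int) (m j : Nat) (v d : Int) (h : m ≠ j) :
    (l.set m v).getD j d = l.getD j d := by
  simp [List.getD, List.getElem?_set_ne h]

theorem trib_succ (i : Nat) :
    trib (i+1) = (if 1 ≤ i then trib (i-1) else 0) + (if 2 ≤ i then trib (i-2) else 0) + trib i := by
  match i with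
  | 0 => simp [trib]
  | 1 => simp [trib]
  | (k+2) =>
    simp only [show 1 ≤ k+2 by omega, show 2 ≤ k+2 by omega, if_pos, show k+2-1 = k+1 by omega, show k+2-2 = k by omega]
    have : trib (k+3) = trib k + trib (k+1) + trib (k+2) := rfl
    rw [show k+2+1 = k+3 from rfl, this]
    ring

theorem getElem_stList (N i j : Nat) (hj : j < (stList N i).length) :
    (stList N i)[j] = stVal i j := by
  simp [stList]

theorem step_stList (N i : Nat) (h : i ≤ N) :
    stepA (N : Int) (stList N i) (i : Int) = stList N (i+1) := by
  have c1 : ((i:Int)+1) = ((i+1:Nat):Int) := by push_cast; ring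
  have c2 : ((i:Int)+2) = ((i+2:Nat):Int) := by push_cast; ring
  have c3 : ((i:Int)+3) = ((i+3:Nat):Int) := by push_cast; ring
  unfold stepA
  simp only [c1, c2, c3, PySem.List.pySetD_natCast, PySem.List.pyGetD_natCast, Nat.cast_le]
  have r0 : (stList N i).getD i 0 = trib i := by
    rw [getD_stList _ _ _ (by omega)]; simp [stVal]
  by_cases h3 : i + 3 ≤ N
  · have h1 : i + 1 ≤ N := by omega
    have h2 : i + 2 ≤ N := by omega
    simp only [h1, h2, h3, if_true]
    rw [getD_set_ne _ _ _ _ _ (by omega), getD_set_ne _ _ _ _ _ (by omega),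
        getD_set_ne _ _ _ _ _ (by omega), getD_set_ne _ _ _ _ _ (by omega),
        getD_set_ne _ _ _ _ _ (by omega), getD_set_ne _ _ _ _ _ (by omega),
        r0, getD_stList _ _ _ (by omega), getD_stList _ _ _ (by omega),
        getD_stList _ _ _ (by omega)]
    apply List.ext_getElem
    · simp [length_stList]
    · intro j hj1 hj2
      simp only [List.getElem_set, getElem_stList]
      by_cases e3 : i + 3 = j
      · rw [if_pos e3, ← e3]
        simp [stVal, show ¬(i+3 ≤ i) by omega, show i+3 ≠ i+2 by omega, show ¬(i+3 ≤ i+1) by omega]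
      · rw [if_neg e3]
        by_cases e2 : i + 2 = j
        · rw [if_pos e2, ← e2]
          simp [stVal, show ¬(i+2 ≤ i) by omega, show ¬(i+2 ≤ i+1) by omega, show i+2 = i+1+1 from rfl,
            show (2 ≤ i+1) ↔ (1 ≤ i) by omega]
          split_ifs <;> ring
        · rw [if_neg e2]
          by_cases e1 : i + 1 = j
          · rw [if_pos e1, ← e1]
            simp only [stVal, show ¬(i+1 ≤ i) by omega, if_false,
              if_pos (show i+1 ≤ i+1 from le_refl _), if_true, trib_succ]
          · rw [if_neg e1]
            simp only [stVal]
            split_ifs <;> first | rfl | (exfalso; omega)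
  · by_cases h2 : i + 2 ≤ N
    · have h1 : i + 1 ≤ N := by omega
      simp only [h1, h2, if_true, h3, if_false]
      rw [getD_set_ne _ _ _ _ _ (by omega), getD_set_ne _ _ _ _ _ (by omega),
          r0, getD_stList _ _ _ (by omega), getD_stList _ _ _ (by omega)]
      apply List.ext_getElem
      · simp [length_stList]
      · intro j hj1 hj2
        simp only [List.length_set, length_stList] at hj1 hj2
        simp only [List.getElem_set, getElem_stList]
        by_cases e2 : i + 2 = j
        · rw [if_pos e2, ← e2]
          simp [stVal, show ¬(i+2 ≤ i) by omega, show ¬(i+2 ≤ i+1) by omega,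
            show i+2 = i+1+1 from rfl, show (2 ≤ i+1) ↔ (1 ≤ i) by omega]
          split_ifs <;> ring
        · rw [if_neg e2]
          by_cases e1 : i + 1 = j
          · rw [if_pos e1, ← e1]
            simp only [stVal, show ¬(i+1 ≤ i) by omega, if_false,
              if_pos (show i+1 ≤ i+1 from le_refl _), if_true, trib_succ]
          · rw [if_neg e1]
            simp only [stVal]
            split_ifs <;> first | rfl | (exfalso; omega)
    · by_cases h1 : i + 1 ≤ N
      · simp only [h1, if_true, h2, h3, if_false]
        rw [r0, getD_stList _ _ _ (by omega)]
        apply List.ext_getElem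
        · simp [length_stList]
        · intro j hj1 hj2
          simp only [List.length_set, length_stList] at hj1 hj2
          simp only [List.getElem_set, getElem_stList]
          by_cases e1 : i + 1 = j
          · rw [if_pos e1, ← e1]
            simp only [stVal, show ¬(i+1 ≤ i) by omega, if_false,
              if_pos (show i+1 ≤ i+1 from le_refl _), if_true, trib_succ]
          · rw [if_neg e1]
            simp only [stVal]
            split_ifs <;> first | rfl | (exfalso; omega)
      · simp only [h1, h2, h3, if_false]
        apply List.ext_getElem
        · simp [length_stList]
        · intro j hj1 hj2
          simp only [length_stList] at hj1 hj2
          simp only [getElem_stList]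
          simp only [stVal]
          split_ifs <;> first | rfl | (exfalso; omega)

theorem fold_stList (N : Nat) : ∀ d k, k + d = N + 1 →
    (PySem.List.pyRange (k : Int) ((N : Int)+1) 1).foldl (stepA (N : Int)) (stList N k) = stList N (N+1) := by
  intro d
  induction d with
  | zero =>
    intro k hk
    rw [PySem.List.pyRange_one_eq_nil (by omega), List.foldl_nil,
        show k = N+1 by omega]
  | succ d ih =>
    intro k hk
    rw [PySem.List.pyRange_one_cons (by omega), List.foldl_cons,
        step_stList N k (by omega)]
    have : ((k : Int) + 1) = ((k + 1 : Nat) : Int) := by push_cast; ring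
    rw [this]
    exact ih (k+1) (by omega)

theorem init_stList (N : Nat) :
    (((PySem.List.pyRange 0 ((N : Int)+1) 1).map (fun _ => (0:Int))).set 0 1) = stList N 0 := by
  apply List.ext_getElem
  · simp [PySem.List.length_pyRange_one, length_stList]
  · intro j h1 h2
    simp only [length_stList] at h2
    simp only [List.getElem_set, List.getElem_map, getElem_stList]
    by_cases e : 0 = j
    · rw [if_pos e, ← e]
      simp [stVal, trib]
    · rw [if_neg e]
      simp only [stVal]
      split_ifs <;> first | rfl | omega

theorem find_eq_trib (n : Int) (hn : 0 ≤ n) : find n = trib n.toNat := by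
  obtain ⟨N, rfl⟩ : ∃ N : Nat, n = (N : Int) := ⟨n.toNat, (Int.toNat_of_nonneg hn).symm⟩
  show PySem.List.pyGetD
      ((PySem.List.pyRange 0 ((N:Int)+1) 1).foldl (stepA (N:Int))
        (PySem.List.pySetD ((PySem.List.pyRange 0 ((N:Int)+1) 1).map (fun _ => (0:Int))) 0 1))
      (N:Int) 0 = trib ((N:Int)).toNat
  have hinit : PySem.List.pySetD ((PySem.List.pyRange 0 ((N:Int)+1) 1).map (fun _ => (0:Int))) 0 1
      = stList N 0 := by
    have h0 : ((0:Nat):Int) = 0 := rfl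
    rw [← h0, PySem.List.pySetD_natCast]
    exact init_stList N
  rw [hinit]
  have hfold := fold_stList N (N+1) 0 (by omega)
  rw [show ((0:Nat):Int) = (0:Int) from rfl] at hfold
  rw [hfold, PySem.List.pyGetD_natCast, getD_stList _ _ _ (le_refl N)]
  simp [stVal, show N ≤ N+1 by omega]

-- ===== VERDICT (by name: the statement is the Claim_ definition above) =====
theorem find_spec : Claim_equal_find := by
  intro n _ hpre
  show find n = find_alt n
  rw [find_eq_trib n hpre, find_alt_eq_trib]
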